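-- pv_equiv track=rewrite | github.com/Mikosztyla/UniversityProgramms | WDI_sets/Recursion/16.py | ile_samoglosek
-- ===== SOURCE A (Python) =====
-- def ile_samoglosek(s):
--     licznik = 0
--     suma_asci = 0
--     for litera in s:
--         if ord(litera) == 97 or ord(litera) == 101 or ord(litera) == 105 or ord(litera) == 111 or ord(litera) == 117:
--             licznik += 1
--         suma_asci += ord(litera)
--     return licznik, suma_asci
-- ===== SOURCE B (Python) =====
-- def ile_samoglosek(s):
--     return sum(s.count(v) for v in "aeiou"), sum(map(ord, s))
-- ===== Notes on version B (the rewrite author's own statement) =====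
-- stated objective: idiomatic
-- what changed: Replaces the single per-character pass that maintains two accumulators with two independent reductions: the vowel count is the sum of five whole-string str.count scans (one per vowel, valid because the vowels are distinct single characters) and the ASCII sum is sum(map(ord, s)).
import Mathlib
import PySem

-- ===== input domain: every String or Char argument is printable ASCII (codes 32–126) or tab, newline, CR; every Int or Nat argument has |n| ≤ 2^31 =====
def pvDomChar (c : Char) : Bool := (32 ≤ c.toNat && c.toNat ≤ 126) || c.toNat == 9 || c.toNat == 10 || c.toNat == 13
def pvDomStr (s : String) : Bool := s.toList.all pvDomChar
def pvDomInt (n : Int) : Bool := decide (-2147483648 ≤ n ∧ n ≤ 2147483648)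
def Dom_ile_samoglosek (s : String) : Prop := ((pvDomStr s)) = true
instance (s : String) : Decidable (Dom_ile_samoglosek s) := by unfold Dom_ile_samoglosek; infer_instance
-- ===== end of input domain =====

-- B computes the two results by separate reductions (five str.count scans for the
-- vowels, one ord-sum) instead of A's single two-accumulator per-character pass; idiomatic.


-- ===== PORT A =====
-- one pass over the string, two accumulators (licznik, suma_asci)
def ile_samoglosek (s : String) : Int × Int :=
  s.toList.foldl
    (fun (st : Int × Int) litera =>
      ((if litera.toNat == 97 || litera.toNat == 101 || litera.toNat == 105 ||
           litera.toNat == 111 || litera.toNat == 117 then st.1 + 1 else st.1),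
       st.2 + (litera.toNat : Int)))
    (0, 0)

-- ===== PORT B =====
-- sum(s.count(v) for v in "aeiou"), sum(map(ord, s))
def ile_samoglosek_alt (s : String) : Int × Int :=
  ((("aeiou".toList).map (fun v => (PySem.Str.count s (String.ofList [v]) : Int))).sum,
   (s.toList.map (fun c => (c.toNat : Int))).sum)

-- ===== PRECONDITION & SPEC =====
def Spec_ile_samoglosek (s : String) (out : Int × Int) : Prop := out = ile_samoglosek_alt s
instance (s : String) (out : Int × Int) : Decidable (Spec_ile_samoglosek s out) := by unfold Spec_ile_samoglosek; infer_instance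

-- ===== CLAIM (what is proved, stated in full; the proofs are below) =====
def Claim_equal_ile_samoglosek : Prop := ∀ (s : String), Dom_ile_samoglosek s → Spec_ile_samoglosek s (ile_samoglosek s)

-- ===== LEMMAS AND PROOFS =====

-- Python's s.count(sub) for a single-character sub is the plain character count.
theorem count_go_singleton (v : Char) : ∀ (fuel : Nat) (cs : List Char) (acc : Nat),
    cs.length ≤ fuel → PySem.Chars.count.go [v] fuel cs acc = acc + cs.count v
  | 0, [], acc, _ => by simp [PySem.Chars.count.go]
  | 0, _ :: _, _, h => by simp at h
  | fuel+1, [], acc, h => by simp [PySem.Chars.count.go]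
  | fuel+1, c :: t, acc, h => by
    have ih := count_go_singleton v fuel t
    simp only [List.length] at h
    by_cases hv : v = c
    · subst hv
      simp [PySem.Chars.count.go, List.isPrefixOf, ih (acc + 1) (by omega)]
      omega
    · simp [PySem.Chars.count.go, List.isPrefixOf, hv, ih acc (by omega), Ne.symm hv]

theorem count_singleton (cs : List Char) (v : Char) :
    PySem.Chars.count cs [v] = cs.count v := by
  simp [PySem.Chars.count, count_go_singleton v cs.length cs 0 le_rfl]

-- the vowels are five distinct characters, so the 0/1-count splits into five counts
theorem countP_vowels (cs : List Char) :
    cs.countP (fun c => c.toNat == 97 || c.toNat == 101 || c.toNat == 105 ||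
      c.toNat == 111 || c.toNat == 117) =
    cs.count 'a' + cs.count 'e' + cs.count 'i' + cs.count 'o' + cs.count 'u' := by
  induction cs with
  | nil => simp
  | cons c t ih =>
    have hc : ∀ v : Char, (c = v) ↔ (c.toNat = v.toNat) := by
      intro v
      constructor
      · intro h; rw [h]
      · intro h; exact Char.ext (UInt32.toNat_inj.mp h)
    simp only [List.countP_cons, List.count_cons, ih]
    by_cases ha : c = 'a' <;> by_cases he : c = 'e' <;> by_cases hi : c = 'i' <;>
      by_cases ho : c = 'o' <;> by_cases hu : c = 'u' <;>
      simp_all [hc 'a', hc 'e', hc 'i', hc 'o', hc 'u'] <;> omega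

-- ===== VERDICT (by name: the statement is the Claim_ definition above) =====
theorem ile_samoglosek_spec : Claim_equal_ile_samoglosek := by
  intro s _
  unfold Spec_ile_samoglosek ile_samoglosek ile_samoglosek_alt
  rw [PySem.List.foldl_prod_mk (fun a litera =>
        if litera.toNat == 97 || litera.toNat == 101 || litera.toNat == 105 ||
           litera.toNat == 111 || litera.toNat == 117 then a + 1 else a)
      (fun a litera => a + (litera.toNat : Int)) s.toList 0 0]
  rw [PySem.List.foldl_count_if, PySem.List.foldl_add]
  simp [PySem.Str.count_eq, count_singleton, countP_vowels, String.toList_ofList]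
  ring
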